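-- pv_equiv track=rewrite | github.com/mangow0527/text2cypher-agent-hub | agents/cypher-generator-agent/app/preflight.py | _mask_non_code_segments
-- ===== SOURCE A (Python) =====
-- def _mask_non_code_segments(query: str) -> str:
--     masked: list[str] = []
--     quote: str | None = None
--     comment: str | None = None
--     escaped = False
--     index = 0
--     while index < len(query):
--         char = query[index]
--         next_char = query[index + 1] if index + 1 < len(query) else None
--         if quote:
--             if escaped:
--                 escaped = False
--             elif char == "\\":
--                 escaped = True
--             elif char == quote:
--                 quote = None
--                 masked.append(char)
--                 index += 1
--                 continue
--             masked.append(" ")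
--             index += 1
--             continue
--         if comment == "line":
--             masked.append("\n" if char == "\n" else " ")
--             if char == "\n":
--                 comment = None
--             index += 1
--             continue
--         if comment == "block":
--             if char == "*" and next_char == "/":
--                 masked.append(" ")
--                 masked.append(" ")
--                 comment = None
--                 index += 2
--                 continue
--             masked.append(" ")
--             index += 1
--             continue
--         if char == "/" and next_char == "/":
--             masked.append(" ")
--             masked.append(" ")
--             comment = "line"
--             index += 2
--             continue
--         if char == "/" and next_char == "*":
--             masked.append(" ")
--             masked.append(" ")
--             comment = "block"
--             index += 2
--             continue
--         elif char in {"'", '"'}: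
--             quote = char
--             masked.append(char)
--         else:
--             masked.append(char)
--         index += 1
--     return "".join(masked)
-- ===== SOURCE B (Python) =====
-- # Segment-based rewrite: instead of a char-by-char mode state machine, the outer
-- # loop jumps from delimiter to delimiter; bounded helper scans locate each
-- # segment's end and whole masked segments are emitted in bulk.
--
-- def _string_close(query: str, c: str, j: int) -> int:
--     n = len(query)
--     while j < n:
--         if query[j] == "\\":
--             j += 2
--         elif query[j] == c:
--             return j
--         else:
--             j += 1
--     return j
--
--
-- def _find_char(query: str, ch: str, j: int) -> int:
--     n = len(query)
--     while j < n:
--         if query[j] == ch: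
--             return j
--         j += 1
--     return j
--
--
-- def _find_close(query: str, j: int) -> int:
--     n = len(query)
--     while j + 1 < n:
--         if query[j] == "*" and query[j + 1] == "/":
--             return j
--         j += 1
--     return n
--
--
-- def _mask_non_code_segments(query: str) -> str:
--     n = len(query)
--     parts: list[str] = []
--     i = 0
--     while i < n:
--         c = query[i]
--         if c == "'" or c == '"':
--             j = _string_close(query, c, i + 1)
--             if j < n:
--                 parts.append(c + " " * (j - i - 1) + c)
--                 i = j + 1
--             else:
--                 parts.append(c + " " * (n - i - 1))
--                 i = n
--         elif c == "/" and i + 1 < n and query[i + 1] == "/":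
--             j = _find_char(query, "\n", i + 2)
--             parts.append(" " * (j - i))
--             i = j
--         elif c == "/" and i + 1 < n and query[i + 1] == "*":
--             j = _find_close(query, i + 2)
--             if j < n:
--                 parts.append(" " * (j + 2 - i))
--                 i = j + 2
--             else:
--                 parts.append(" " * (n - i))
--                 i = n
--         else:
--             parts.append(c)
--             i += 1
--     return "".join(parts)
-- ===== Notes on version B (the rewrite author's own statement) =====
-- stated objective: faster
-- what changed: Replaced the char-by-char mode state machine (quote/comment/escaped flags updated and one list append per character) with a segment-based scanner: the outer loop dispatches on the next delimiter, bounded helper scans locate each segment's end, and whole masked segments are emitted in bulk via string repetition.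
import Mathlib
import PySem

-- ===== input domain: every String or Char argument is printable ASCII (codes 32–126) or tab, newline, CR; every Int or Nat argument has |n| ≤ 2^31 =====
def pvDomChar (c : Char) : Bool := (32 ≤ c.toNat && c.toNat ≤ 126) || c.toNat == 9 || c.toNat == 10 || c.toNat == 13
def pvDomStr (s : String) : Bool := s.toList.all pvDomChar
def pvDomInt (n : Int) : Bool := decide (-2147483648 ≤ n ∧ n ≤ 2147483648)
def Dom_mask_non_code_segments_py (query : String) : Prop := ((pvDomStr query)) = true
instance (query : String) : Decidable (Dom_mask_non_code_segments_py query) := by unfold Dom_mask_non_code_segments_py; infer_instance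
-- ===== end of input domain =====

-- B replaces A's per-character mode state machine by a segment scanner that emits whole
-- masked segments at once (same O(n), measured constant-factor faster in a timing run).

-- ===== PORT A =====
-- Literal port of A's while loop: state = (masked, quote, comment, escaped, index);
-- one fuel unit per iteration (the index advances every iteration, so cs.length units suffice).
def maskLoopAF (cs : List Char) : Nat → List Char → Option Char → Option String → Bool → Nat → List Char
  | 0, masked, _, _, _, _ => masked
  | fuel + 1, masked, quote, comment, escaped, index =>
    if _h : index < cs.length then
      let char := cs[index]
      let next_char := cs[index + 1]?
      match quote with
      | some q =>
        if escaped then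
          maskLoopAF cs fuel (masked ++ [' ']) (some q) comment false (index + 1)
        else if char = '\\' then
          maskLoopAF cs fuel (masked ++ [' ']) (some q) comment true (index + 1)
        else if char = q then
          maskLoopAF cs fuel (masked ++ [char]) none comment false (index + 1)
        else
          maskLoopAF cs fuel (masked ++ [' ']) (some q) comment false (index + 1)
      | none =>
        if comment = some "line" then
          maskLoopAF cs fuel (masked ++ [if char = '\n' then '\n' else ' '])
            none (if char = '\n' then none else comment) false (index + 1)
        else if comment = some "block" then
          if char = '*' ∧ next_char = some '/' then
            maskLoopAF cs fuel (masked ++ [' ', ' ']) none none false (index + 2)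
          else
            maskLoopAF cs fuel (masked ++ [' ']) none comment false (index + 1)
        else if char = '/' ∧ next_char = some '/' then
          maskLoopAF cs fuel (masked ++ [' ', ' ']) none (some "line") false (index + 2)
        else if char = '/' ∧ next_char = some '*' then
          maskLoopAF cs fuel (masked ++ [' ', ' ']) none (some "block") false (index + 2)
        else if char = '\'' ∨ char = '"' then
          maskLoopAF cs fuel (masked ++ [char]) (some char) none false (index + 1)
        else
          maskLoopAF cs fuel (masked ++ [char]) none none false (index + 1)
    else masked

def mask_non_code_segments_py (query : String) : String :=
  String.ofList (maskLoopAF query.toList query.toList.length [] none none false 0)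

-- ===== PORT B =====
-- helper scans of Source B (each advances its index every iteration: cs.length fuel units suffice)
def strCloseBF (cs : List Char) (c : Char) : Nat → Nat → Nat
  | 0, j => j
  | fuel + 1, j =>
    if _h : j < cs.length then
      if cs[j] = '\\' then strCloseBF cs c fuel (j + 2)
      else if cs[j] = c then j
      else strCloseBF cs c fuel (j + 1)
    else j

def findCharBF (cs : List Char) (ch : Char) : Nat → Nat → Nat
  | 0, j => j
  | fuel + 1, j =>
    if _h : j < cs.length then
      if cs[j] = ch then j else findCharBF cs ch fuel (j + 1)
    else j

def findCloseBF (cs : List Char) : Nat → Nat → Nat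
  | 0, _ => cs.length
  | fuel + 1, j =>
    if h : j + 1 < cs.length then
      if cs[j]'(Nat.lt_of_succ_lt h) = '*' ∧ cs[j + 1] = '/' then j
      else findCloseBF cs fuel (j + 1)
    else cs.length

-- B's outer loop: dispatch on the next delimiter, emit whole masked segments in bulk
def maskLoopBF (cs : List Char) : Nat → List Char → Nat → List Char
  | 0, parts, _ => parts
  | fuel + 1, parts, i =>
    if _h : i < cs.length then
      let c := cs[i]
      if c = '\'' ∨ c = '"' then
        let j := strCloseBF cs c cs.length (i + 1)
        if j < cs.length then
          maskLoopBF cs fuel (parts ++ (c :: List.replicate (j - i - 1) ' ' ++ [c])) (j + 1)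
        else parts ++ (c :: List.replicate (cs.length - i - 1) ' ')
      else if c = '/' ∧ i + 1 < cs.length ∧ cs[i + 1]! = '/' then
        let j := findCharBF cs '\n' cs.length (i + 2)
        maskLoopBF cs fuel (parts ++ List.replicate (j - i) ' ') j
      else if c = '/' ∧ i + 1 < cs.length ∧ cs[i + 1]! = '*' then
        let j := findCloseBF cs cs.length (i + 2)
        if j < cs.length then
          maskLoopBF cs fuel (parts ++ List.replicate (j + 2 - i) ' ') (j + 2)
        else parts ++ List.replicate (cs.length - i) ' '
      else maskLoopBF cs fuel (parts ++ [c]) (i + 1)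
    else parts

def mask_non_code_segments_py_alt (query : String) : String :=
  String.ofList (maskLoopBF query.toList query.toList.length [] 0)

-- ===== PRECONDITION & SPEC =====
def Spec_mask_non_code_segments_py (query : String) (out : String) : Prop := out = mask_non_code_segments_py_alt query
instance (query : String) (out : String) : Decidable (Spec_mask_non_code_segments_py query out) := by unfold Spec_mask_non_code_segments_py; infer_instance

-- ===== CLAIM (what is proved, stated in full; the proofs are below) =====
def Claim_equal_mask_non_code_segments_py : Prop := ∀ (query : String), Dom_mask_non_code_segments_py query → Spec_mask_non_code_segments_py query (mask_non_code_segments_py query)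

-- ===== LEMMAS AND PROOFS =====

-- Fuel-free (well-founded) reformulations of the two loops; the segment lemmas are stated about these, and bridge lemmas connect them to the fuel ports above.
-- Literal port of A's while loop: state = (masked, quote, comment, escaped, index).
def maskLoopA (cs : List Char) (masked : List Char) (quote : Option Char)
    (comment : Option String) (escaped : Bool) (index : Nat) : List Char :=
  if h : index < cs.length then
    let char := cs[index]
    let next_char := cs[index + 1]?
    match quote with
    | some q =>
      if escaped then
        maskLoopA cs (masked ++ [' ']) (some q) comment false (index + 1)
      else if char = '\\' then
        maskLoopA cs (masked ++ [' ']) (some q) comment true (index + 1)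
      else if char = q then
        maskLoopA cs (masked ++ [char]) none comment false (index + 1)
      else
        maskLoopA cs (masked ++ [' ']) (some q) comment false (index + 1)
    | none =>
      if comment = some "line" then
        maskLoopA cs (masked ++ [if char = '\n' then '\n' else ' '])
          none (if char = '\n' then none else comment) false (index + 1)
      else if comment = some "block" then
        if char = '*' ∧ next_char = some '/' then
          maskLoopA cs (masked ++ [' ', ' ']) none none false (index + 2)
        else
          maskLoopA cs (masked ++ [' ']) none comment false (index + 1)
      else if char = '/' ∧ next_char = some '/' then
        maskLoopA cs (masked ++ [' ', ' ']) none (some "line") false (index + 2)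
      else if char = '/' ∧ next_char = some '*' then
        maskLoopA cs (masked ++ [' ', ' ']) none (some "block") false (index + 2)
      else if char = '\'' ∨ char = '"' then
        maskLoopA cs (masked ++ [char]) (some char) none false (index + 1)
      else
        maskLoopA cs (masked ++ [char]) none none false (index + 1)
  else masked
termination_by cs.length - index

-- helper scans of Source B
def strCloseB (cs : List Char) (c : Char) (j : Nat) : Nat :=
  if h : j < cs.length then
    if cs[j] = '\\' then strCloseB cs c (j + 2)
    else if cs[j] = c then j
    else strCloseB cs c (j + 1)
  else j
termination_by cs.length - j

def findCharB (cs : List Char) (ch : Char) (j : Nat) : Nat :=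
  if h : j < cs.length then
    if cs[j] = ch then j else findCharB cs ch (j + 1)
  else j
termination_by cs.length - j

def findCloseB (cs : List Char) (j : Nat) : Nat :=
  if h : j + 1 < cs.length then
    if cs[j]'(Nat.lt_of_succ_lt h) = '*' ∧ cs[j + 1] = '/' then j else findCloseB cs (j + 1)
  else cs.length
termination_by cs.length - j

-- lower bounds on the helper scans, needed for loopB's termination
theorem strCloseB_ge (cs : List Char) (c : Char) : ∀ j, j ≤ strCloseB cs c j := by
  have key : ∀ k j, cs.length - j ≤ k → j ≤ strCloseB cs c j := by
    intro k
    induction k with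
    | zero =>
      intro j hk
      rw [strCloseB]; split
      · omega
      · exact le_rfl
    | succ k ih =>
      intro j hk
      rw [strCloseB]; split
      · split
        · exact le_trans (by omega) (ih (j + 2) (by omega))
        · split
          · exact le_rfl
          · exact le_trans (by omega) (ih (j + 1) (by omega))
      · exact le_rfl
  exact fun j => key (cs.length - j) j le_rfl

theorem findCharB_ge (cs : List Char) (ch : Char) : ∀ j, j ≤ findCharB cs ch j := by
  have key : ∀ k j, cs.length - j ≤ k → j ≤ findCharB cs ch j := by
    intro k
    induction k with
    | zero =>
      intro j hk
      rw [findCharB]; split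
      · omega
      · exact le_rfl
    | succ k ih =>
      intro j hk
      rw [findCharB]; split
      · split
        · exact le_rfl
        · exact le_trans (by omega) (ih (j + 1) (by omega))
      · exact le_rfl
  exact fun j => key (cs.length - j) j le_rfl

theorem findCloseB_ge (cs : List Char) : ∀ j, j ≤ cs.length + 1 → j ≤ findCloseB cs j + 1 := by
  have key : ∀ k j, cs.length - j ≤ k → j ≤ cs.length + 1 → j ≤ findCloseB cs j + 1 := by
    intro k
    induction k with
    | zero =>
      intro j hk hj
      rw [findCloseB]; split
      · omega
      · omega
    | succ k ih =>
      intro j hk hj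
      rw [findCloseB]; split
      · split
        · omega
        · exact le_trans (by omega) (ih (j + 1) (by omega) (by omega))
      · omega
  exact fun j hj => key (cs.length - j) j le_rfl hj

-- B's outer loop
def maskLoopB (cs : List Char) (parts : List Char) (i : Nat) : List Char :=
  if h : i < cs.length then
    let c := cs[i]
    if c = '\'' ∨ c = '"' then
      let j := strCloseB cs c (i + 1)
      if j < cs.length then
        maskLoopB cs (parts ++ (c :: List.replicate (j - i - 1) ' ' ++ [c])) (j + 1)
      else parts ++ (c :: List.replicate (cs.length - i - 1) ' ')
    else if c = '/' ∧ i + 1 < cs.length ∧ cs[i + 1]! = '/' then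
      let j := findCharB cs '\n' (i + 2)
      maskLoopB cs (parts ++ List.replicate (j - i) ' ') j
    else if c = '/' ∧ i + 1 < cs.length ∧ cs[i + 1]! = '*' then
      let j := findCloseB cs (i + 2)
      if j < cs.length then
        maskLoopB cs (parts ++ List.replicate (j + 2 - i) ' ') (j + 2)
      else parts ++ List.replicate (cs.length - i) ' '
    else maskLoopB cs (parts ++ [c]) (i + 1)
  else parts
termination_by cs.length - i
decreasing_by
  · have := strCloseB_ge cs cs[i] (i + 1); omega
  · have := findCharB_ge cs '\n' (i + 2); omega
  · have := findCloseB_ge cs (i + 2) (by omega); omega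
  · omega



theorem findCloseB_ge_of_lt (cs : List Char) :
    ∀ j, findCloseB cs j < cs.length → j ≤ findCloseB cs j := by
  have key : ∀ k j, cs.length - j ≤ k → findCloseB cs j < cs.length → j ≤ findCloseB cs j := by
    intro k
    induction k with
    | zero =>
      intro j hk hlt
      rw [findCloseB] at hlt ⊢
      split at hlt
      · omega
      · omega
    | succ k ih =>
      intro j hk hlt
      rw [findCloseB] at hlt ⊢
      split at hlt
      · rename_i h
        split at hlt
        · rename_i hc
          simp only [h, ↓reduceDIte]
          rw [if_pos hc]
        · rename_i hc
          simp only [h, ↓reduceDIte, hc, if_false]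
          exact le_trans (by omega) (ih (j + 1) (by omega) hlt)
      · omega
  exact fun j => key (cs.length - j) j le_rfl

theorem maskLoopA_stop (cs : List Char) (m : List Char) (q : Option Char)
    (c : Option String) (e : Bool) (i : Nat) (h : ¬ i < cs.length) :
    maskLoopA cs m q c e i = m := by
  rw [maskLoopA, dif_neg h]

-- quote mode of A = strCloseB segment
theorem quote_mode (cs : List Char) (q : Char) :
    ∀ j masked, maskLoopA cs masked (some q) none false j =
      if strCloseB cs q j < cs.length then
        maskLoopA cs (masked ++ List.replicate (strCloseB cs q j - j) ' ' ++ [q])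
          none none false (strCloseB cs q j + 1)
      else masked ++ List.replicate (cs.length - j) ' ' := by
  have key : ∀ k j masked, cs.length - j ≤ k →
      maskLoopA cs masked (some q) none false j =
      if strCloseB cs q j < cs.length then
        maskLoopA cs (masked ++ List.replicate (strCloseB cs q j - j) ' ' ++ [q])
          none none false (strCloseB cs q j + 1)
      else masked ++ List.replicate (cs.length - j) ' ' := by
    intro k
    induction k with
    | zero =>
      intro j masked hk
      have hj : ¬ j < cs.length := by omega
      rw [maskLoopA, strCloseB]
      simp [hj, show cs.length - j = 0 by omega]
    | succ k ih =>
      intro j masked hk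
      by_cases hj : j < cs.length
      · rw [maskLoopA]
        by_cases hb : cs[j] = '\\'
        · -- A sets escaped, appends a space; next step consumes one char as a space
          simp only [hj, ↓reduceDIte, hb, if_true, Bool.false_eq_true, if_false]
          rw [maskLoopA]
          rw [show strCloseB cs q j = strCloseB cs q (j + 2) by rw [strCloseB]; simp [hj, hb]]
          by_cases hj1 : j + 1 < cs.length
          · simp only [hj1, ↓reduceDIte, if_true]
            rw [ih (j + 2) (masked ++ [' '] ++ [' ']) (by omega)]
            have hge := strCloseB_ge cs q (j + 2)
            by_cases he : strCloseB cs q (j + 2) < cs.length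
            · simp only [he, if_true]
              have h2 : strCloseB cs q (j + 2) - j = 2 + (strCloseB cs q (j + 2) - (j + 2)) := by omega
              rw [h2, List.replicate_add]
              simp [List.append_assoc, List.replicate_succ]
            · simp only [he, if_false]
              have h2 : cs.length - j = 2 + (cs.length - (j + 2)) := by omega
              rw [h2, List.replicate_add]
              simp [List.append_assoc, List.replicate_succ]
          · simp only [hj1, ↓reduceDIte]
            have he : ¬ strCloseB cs q (j + 2) < cs.length := by
              have h2 : ¬ j + 2 < cs.length := by omega
              rw [strCloseB, dif_neg h2]; omega
            simp only [he, if_false]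
            have h1 : cs.length - j = 1 := by omega
            simp [h1, List.replicate_succ]
        · by_cases hq : cs[j] = q
          · -- closing quote
            have hqb : ¬ q = '\\' := fun h => hb (hq.trans h)
            simp only [hj, ↓reduceDIte, hq, hqb, if_true, if_false, Bool.false_eq_true]
            rw [show strCloseB cs q j = j by rw [strCloseB, dif_pos hj, if_neg hb, if_pos hq]]
            simp [hj]
          · -- ordinary char inside the string: one space
            simp only [hj, ↓reduceDIte, hb, if_false, hq, if_false, Bool.false_eq_true]
            rw [ih (j + 1) (masked ++ [' ']) (by omega)]
            rw [show strCloseB cs q j = strCloseB cs q (j + 1) by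
              rw [strCloseB]; simp [hj, hb, hq]]
            have hge := strCloseB_ge cs q (j + 1)
            by_cases he : strCloseB cs q (j + 1) < cs.length
            · simp only [he, if_true]
              have h2 : strCloseB cs q (j + 1) - j = 1 + (strCloseB cs q (j + 1) - (j + 1)) := by omega
              rw [h2, List.replicate_add]
              simp [List.append_assoc, List.replicate_succ]
            · simp only [he, if_false]
              have h2 : cs.length - j = 1 + (cs.length - (j + 1)) := by omega
              rw [h2, List.replicate_add]
              simp [List.append_assoc, List.replicate_succ]
      · rw [maskLoopA, strCloseB]
        simp [hj, show cs.length - j = 0 by omega]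
  exact fun j masked => key (cs.length - j) j masked le_rfl

-- line-comment mode of A = findCharB segment
theorem line_mode (cs : List Char) :
    ∀ j masked, maskLoopA cs masked none (some "line") false j =
      maskLoopA cs (masked ++ List.replicate (findCharB cs '\n' j - j) ' ')
        none none false (findCharB cs '\n' j) := by
  have key : ∀ k j masked, cs.length - j ≤ k →
      maskLoopA cs masked none (some "line") false j =
      maskLoopA cs (masked ++ List.replicate (findCharB cs '\n' j - j) ' ')
        none none false (findCharB cs '\n' j) := by
    intro k
    induction k with
    | zero =>
      intro j masked hk
      have hj : ¬ j < cs.length := by omega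
      rw [findCharB, dif_neg hj]
      conv_lhs => rw [maskLoopA]
      conv_rhs => rw [maskLoopA]
      simp [hj]
    | succ k ih =>
      intro j masked hk
      by_cases hj : j < cs.length
      · by_cases hc : cs[j] = '\n'
        · rw [show findCharB cs '\n' j = j by rw [findCharB, dif_pos hj, if_pos hc]]
          conv_lhs => rw [maskLoopA]
          conv_rhs => rw [maskLoopA]
          simp [hj, hc]
        · rw [show findCharB cs '\n' j = findCharB cs '\n' (j + 1) by
            rw [findCharB, dif_pos hj, if_neg hc]]
          conv_lhs => rw [maskLoopA]
          simp only [hj, ↓reduceDIte, hc, if_false]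
          rw [ih (j + 1) (masked ++ [' ']) (by omega)]
          have hge := findCharB_ge cs '\n' (j + 1)
          have h2 : findCharB cs '\n' (j + 1) - j = 1 + (findCharB cs '\n' (j + 1) - (j + 1)) := by
            omega
          rw [h2, List.replicate_add]
          simp [List.append_assoc, List.replicate_succ]
      · rw [findCharB, dif_neg hj]
        conv_lhs => rw [maskLoopA]
        conv_rhs => rw [maskLoopA]
        simp [hj]
  exact fun j masked => key (cs.length - j) j masked le_rfl

-- block-comment mode of A = findCloseB segment
theorem block_mode (cs : List Char) :
    ∀ j masked, maskLoopA cs masked none (some "block") false j =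
      if findCloseB cs j < cs.length then
        maskLoopA cs (masked ++ List.replicate (findCloseB cs j - j) ' ' ++ [' ', ' '])
          none none false (findCloseB cs j + 2)
      else masked ++ List.replicate (cs.length - j) ' ' := by
  have key : ∀ k j masked, cs.length - j ≤ k →
      maskLoopA cs masked none (some "block") false j =
      if findCloseB cs j < cs.length then
        maskLoopA cs (masked ++ List.replicate (findCloseB cs j - j) ' ' ++ [' ', ' '])
          none none false (findCloseB cs j + 2)
      else masked ++ List.replicate (cs.length - j) ' ' := by
    intro k
    induction k with
    | zero =>
      intro j masked hk
      have hj : ¬ j < cs.length := by omega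
      rw [maskLoopA, dif_neg hj]
      rw [findCloseB, dif_neg (by omega)]
      simp [show cs.length - j = 0 by omega]
    | succ k ih =>
      intro j masked hk
      by_cases hj1 : j + 1 < cs.length
      · have hj : j < cs.length := by omega
        have hnext : cs[j + 1]? = some cs[j + 1] := List.getElem?_eq_getElem hj1
        by_cases hc : cs[j] = '*' ∧ cs[j + 1] = '/'
        · -- close found at j
          rw [show findCloseB cs j = j by rw [findCloseB, dif_pos hj1, if_pos hc]]
          conv_lhs => rw [maskLoopA]
          simp only [hj, ↓reduceDIte, hnext, hc.1, hc.2]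
          simp
        · rw [show findCloseB cs j = findCloseB cs (j + 1) by
            rw [findCloseB, dif_pos hj1, if_neg hc]]
          conv_lhs => rw [maskLoopA]
          have hc' : ¬ (cs[j] = '*' ∧ cs[j + 1]? = some '/') := by
            rw [hnext]; simpa using hc
          simp only [hj, ↓reduceDIte, if_false, hc']
          rw [ih (j + 1) (masked ++ [' ']) (by omega)]
          by_cases he : findCloseB cs (j + 1) < cs.length
          · have hge := findCloseB_ge_of_lt cs (j + 1) he
            simp only [he, if_true]
            have h2 : findCloseB cs (j + 1) - j = 1 + (findCloseB cs (j + 1) - (j + 1)) := by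
              omega
            rw [h2, List.replicate_add]
            simp [List.append_assoc, List.replicate_succ]
          · simp only [he, if_false]
            have h2 : cs.length - j = 1 + (cs.length - (j + 1)) := by omega
            rw [h2, List.replicate_add]
            simp [List.append_assoc, List.replicate_succ]
      · have he : ¬ findCloseB cs j < cs.length := by
          rw [findCloseB, dif_neg hj1]; omega
        simp only [he, if_false]
        by_cases hj : j < cs.length
        · have hnext : cs[j + 1]? = none := by
            rw [List.getElem?_eq_none_iff]; omega
          conv_lhs => rw [maskLoopA]
          simp [hj, hnext, maskLoopA_stop cs _ _ _ _ _ hj1,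
            show cs.length - j = 1 by omega, List.replicate_succ]
        · rw [maskLoopA, dif_neg hj]
          simp [show cs.length - j = 0 by omega]
  exact fun j masked => key (cs.length - j) j masked le_rfl

theorem main_loop (cs : List Char) :
    ∀ i masked, maskLoopA cs masked none none false i = maskLoopB cs masked i := by
  have key : ∀ k i masked, cs.length - i ≤ k →
      maskLoopA cs masked none none false i = maskLoopB cs masked i := by
    intro k
    induction k with
    | zero =>
      intro i masked hk
      have hi : ¬ i < cs.length := by omega
      rw [maskLoopA, dif_neg hi, maskLoopB, dif_neg hi]
    | succ k ih =>
      intro i masked hk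
      by_cases hi : i < cs.length
      · conv_rhs => rw [maskLoopB]
        by_cases hqc : cs[i] = '\'' ∨ cs[i] = '"'
        · -- string literal
          have hslash : ¬ (cs[i] = '/') := by
            rcases hqc with h | h <;> rw [h] <;> decide
          conv_lhs => rw [maskLoopA]
          simp only [hi, ↓reduceDIte, hslash, false_and, if_false, hqc, if_true,
            reduceCtorEq]
          rw [quote_mode cs cs[i] (i + 1) (masked ++ [cs[i]])]
          have hge := strCloseB_ge cs cs[i] (i + 1)
          by_cases he : strCloseB cs cs[i] (i + 1) < cs.length
          · simp only [he, if_true]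
            rw [ih (strCloseB cs cs[i] (i + 1) + 1)
              (masked ++ [cs[i]] ++ List.replicate (strCloseB cs cs[i] (i + 1) - (i + 1)) ' ' ++ [cs[i]])
              (by omega)]
            congr 1
            simp [Nat.sub_sub, List.append_assoc]
          · simp only [he, if_false]
            have h2 : cs.length - (i + 1) = cs.length - i - 1 := by omega
            simp [h2, List.append_assoc]
        · by_cases h1 : i + 1 < cs.length
          · have hnext : cs[i + 1]? = some cs[i + 1] := List.getElem?_eq_getElem h1
            have hbang : cs[i + 1]! = cs[i + 1] := getElem!_pos cs (i + 1) h1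
            by_cases hsl : cs[i] = '/' ∧ cs[i + 1] = '/'
            · -- line comment
              conv_lhs => rw [maskLoopA]
              simp only [hi, ↓reduceDIte, hnext, hsl.1, hsl.2, reduceCtorEq, if_false,
                if_true, and_self]
              rw [line_mode cs (i + 2) (masked ++ [' ', ' '])]
              have hge := findCharB_ge cs '\n' (i + 2)
              rw [ih (findCharB cs '\n' (i + 2))
                (masked ++ [' ', ' '] ++ List.replicate (findCharB cs '\n' (i + 2) - (i + 2)) ' ')
                (by omega)]
              simp only [if_false, hsl.2, hbang, h1, and_self, if_true, true_and,
                Char.reduceEq, or_self]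
              congr 1
              have h2 : findCharB cs '\n' (i + 2) - i = 2 + (findCharB cs '\n' (i + 2) - (i + 2)) := by
                omega
              rw [h2, List.replicate_add]
              simp [List.append_assoc, List.replicate_succ]
            · by_cases hst : cs[i] = '/' ∧ cs[i + 1] = '*'
              · -- block comment
                conv_lhs => rw [maskLoopA]
                have hns : ¬ ('*' : Char) = '/' := by decide
                simp only [hi, ↓reduceDIte, hnext, hst.1, hst.2, reduceCtorEq, if_false,
                  if_true, and_self, hns, and_false, Option.some.injEq]
                rw [block_mode cs (i + 2) (masked ++ [' ', ' '])]
                simp only [if_false, hst.2, hbang, h1, and_self, if_true,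
                  hns, and_false]
                by_cases he : findCloseB cs (i + 2) < cs.length
                · have hge := findCloseB_ge_of_lt cs (i + 2) he
                  simp only [he, if_true]
                  rw [ih (findCloseB cs (i + 2) + 2)
                    (masked ++ [' ', ' '] ++ List.replicate (findCloseB cs (i + 2) - (i + 2)) ' '
                      ++ [' ', ' ']) (by omega)]
                  congr 1
                  have h2 : findCloseB cs (i + 2) + 2 - i =
                      2 + ((findCloseB cs (i + 2) - (i + 2)) + 2) := by omega
                  rw [h2, List.replicate_add, List.replicate_add]
                  simp [List.append_assoc, List.replicate_succ]
                · simp only [he, if_false]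
                  have h2 : cs.length - i = 2 + (cs.length - (i + 2)) := by omega
                  rw [h2, List.replicate_add]
                  simp [List.append_assoc, List.replicate_succ]
              · -- plain character
                conv_lhs => rw [maskLoopA]
                have hA1 : ¬ (cs[i] = '/' ∧ cs[i + 1]? = some '/') := by
                  rw [hnext]; simpa using hsl
                have hA2 : ¬ (cs[i] = '/' ∧ cs[i + 1]? = some '*') := by
                  rw [hnext]; simpa using hst
                have hB1 : ¬ (cs[i] = '/' ∧ i + 1 < cs.length ∧ cs[i + 1]! = '/') := by
                  rw [hbang]; tauto
                have hB2 : ¬ (cs[i] = '/' ∧ i + 1 < cs.length ∧ cs[i + 1]! = '*') := by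
                  rw [hbang]; tauto
                simp only [hi, ↓reduceDIte, hA1, hA2, hqc, hB1, hB2, if_false, reduceCtorEq]
                exact ih (i + 1) (masked ++ [cs[i]]) (by omega)
          · have hnext : cs[i + 1]? = none := by rw [List.getElem?_eq_none_iff]; omega
            conv_lhs => rw [maskLoopA]
            have hB1 : ¬ (cs[i] = '/' ∧ i + 1 < cs.length ∧ cs[i + 1]! = '/') := by tauto
            have hB2 : ¬ (cs[i] = '/' ∧ i + 1 < cs.length ∧ cs[i + 1]! = '*') := by tauto
            simp only [hi, ↓reduceDIte, hnext, reduceCtorEq, and_false, if_false, hqc,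
              hB1, hB2]
            exact ih (i + 1) (masked ++ [cs[i]]) (by omega)
      · rw [maskLoopA, dif_neg hi, maskLoopB, dif_neg hi]
  exact fun i masked => key (cs.length - i) i masked le_rfl


-- fuel bridges: with enough fuel the structural ports equal the fuel-free loops
theorem strCloseBF_eq (cs : List Char) (c : Char) :
    ∀ fuel j, cs.length ≤ j + fuel → strCloseBF cs c fuel j = strCloseB cs c j := by
  intro fuel
  induction fuel with
  | zero =>
    intro j hf
    rw [strCloseB, dif_neg (by omega)]
    rfl
  | succ fuel ih =>
    intro j hf
    rw [strCloseB]
    simp only [strCloseBF]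
    split
    · split
      · exact ih (j + 2) (by omega)
      · split
        · rfl
        · exact ih (j + 1) (by omega)
    · rfl

theorem findCharBF_eq (cs : List Char) (ch : Char) :
    ∀ fuel j, cs.length ≤ j + fuel → findCharBF cs ch fuel j = findCharB cs ch j := by
  intro fuel
  induction fuel with
  | zero =>
    intro j hf
    rw [findCharB, dif_neg (by omega)]
    rfl
  | succ fuel ih =>
    intro j hf
    rw [findCharB]
    simp only [findCharBF]
    split
    · split
      · rfl
      · exact ih (j + 1) (by omega)
    · rfl

theorem findCloseBF_eq (cs : List Char) :
    ∀ fuel j, cs.length ≤ j + fuel → findCloseBF cs fuel j = findCloseB cs j := by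
  intro fuel
  induction fuel with
  | zero =>
    intro j hf
    rw [findCloseB, dif_neg (by omega)]
    rfl
  | succ fuel ih =>
    intro j hf
    rw [findCloseB]
    simp only [findCloseBF]
    split
    · split
      · rfl
      · exact ih (j + 1) (by omega)
    · rfl

theorem maskLoopAF_eq (cs : List Char) :
    ∀ fuel masked quote comment escaped index, cs.length ≤ index + fuel →
      maskLoopAF cs fuel masked quote comment escaped index =
        maskLoopA cs masked quote comment escaped index := by
  intro fuel
  induction fuel with
  | zero =>
    intro masked quote comment escaped index hf
    rw [maskLoopA_stop cs masked quote comment escaped index (by omega)]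
    rfl
  | succ fuel ih =>
    intro masked quote comment escaped index hf
    rw [maskLoopA]
    simp only [maskLoopAF]
    split
    · cases quote with
      | some q =>
        dsimp only
        split_ifs <;> (apply ih; omega)
      | none =>
        dsimp only
        split_ifs <;> (apply ih; omega)
    · rfl

theorem maskLoopBF_eq (cs : List Char) :
    ∀ fuel parts i, cs.length ≤ i + fuel →
      maskLoopBF cs fuel parts i = maskLoopB cs parts i := by
  intro fuel
  induction fuel with
  | zero =>
    intro parts i hf
    rw [maskLoopB, dif_neg (by omega)]
    rfl
  | succ fuel ih =>
    intro parts i hf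
    rw [maskLoopB]
    simp only [maskLoopBF]
    split
    · rename_i hi
      rw [strCloseBF_eq cs _ cs.length (i + 1) (by omega),
        findCharBF_eq cs '\n' cs.length (i + 2) (by omega),
        findCloseBF_eq cs cs.length (i + 2) (by omega)]
      split_ifs <;> first
        | rfl
        | (apply ih; have h1 := strCloseB_ge cs cs[i] (i + 1);
           have h2 := findCharB_ge cs '\n' (i + 2);
           have h3 := findCloseB_ge cs (i + 2) (by omega); omega)
    · rfl

-- ===== VERDICT (by name: the statement is the Claim_ definition above) =====
theorem mask_non_code_segments_py_spec : Claim_equal_mask_non_code_segments_py := by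
  intro query _
  unfold Spec_mask_non_code_segments_py mask_non_code_segments_py mask_non_code_segments_py_alt
  rw [maskLoopAF_eq query.toList query.toList.length [] none none false 0 (by omega),
    maskLoopBF_eq query.toList query.toList.length [] 0 (by omega), main_loop]
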